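-- pv_equiv track=rewrite | github.com/queelius/computational-explorations | src/adversarial_misc.py | brute_clique_number
-- ===== SOURCE A (Python) =====
-- from itertools import combinations, product
-- from typing import Dict, List, Optional, Set, Tuple, Any
--
-- def brute_clique_number(adj: Dict[int, Set[int]]) -> int:
--     """Find clique number by brute force on a small graph."""
--     verts = sorted(adj.keys())
--     n = len(verts)
--     best = 0
--     for size in range(1, n + 1):
--         found = False
--         for combo in combinations(verts, size):
--             if all(combo[j] in adj[combo[i]]
--                    for i in range(len(combo))
--                    for j in range(i + 1, len(combo))):
--                 found = True
--                 break
--         if found: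
--             best = size
--         else:
--             break
--     return best
-- ===== SOURCE B (Python) =====
-- def brute_clique_number(adj):
--     """Clique number by include/exclude DFS over the sorted vertex list,
--     pruning candidates to the current vertex's neighbours."""
--     def go(cands):
--         if not cands:
--             return 0
--         v, rest = cands[0], cands[1:]
--         nv = adj[v]
--         return max(1 + go([w for w in rest if w in nv]), go(rest))
--     return go(sorted(adj.keys()))
-- ===== Notes on version B (the rewrite author's own statement) =====
-- stated objective: faster
-- what changed: replaced the size-increasing enumeration of all vertex combinations with an include/exclude DFS that extends a clique vertex by vertex, pruning the candidate set to the current vertex's neighbours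
import Mathlib
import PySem

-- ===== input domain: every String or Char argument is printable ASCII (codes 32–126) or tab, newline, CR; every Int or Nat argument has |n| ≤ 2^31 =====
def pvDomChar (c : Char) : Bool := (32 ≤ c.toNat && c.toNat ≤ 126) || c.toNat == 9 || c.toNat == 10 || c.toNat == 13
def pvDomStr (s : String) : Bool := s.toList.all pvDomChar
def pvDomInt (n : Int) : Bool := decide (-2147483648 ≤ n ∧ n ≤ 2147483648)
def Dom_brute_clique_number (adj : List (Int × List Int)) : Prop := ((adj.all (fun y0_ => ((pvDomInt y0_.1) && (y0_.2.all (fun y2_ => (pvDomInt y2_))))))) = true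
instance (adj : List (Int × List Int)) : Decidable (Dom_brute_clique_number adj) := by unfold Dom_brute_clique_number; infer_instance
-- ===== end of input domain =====

-- B replaces A's size-increasing enumeration of all combinations by an include/exclude
-- DFS extending a clique vertex by vertex with a pruned candidate list (objective: faster).

-- ===== PORT A =====
-- all(combo[j] in adj[combo[i]] for i in range(len(combo)) for j in range(i+1, len(combo)))
def pvAllPairs (d : PySem.Dict Int (List Int)) (combo : List Int) : Bool :=
  (PySem.List.pyRange 0 (combo.length : Int) 1).all fun i =>
    (PySem.List.pyRange (i + 1) (combo.length : Int) 1).all fun j =>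
      ((d.get? (PySem.List.pyGetD combo i 0)).getD []).contains (PySem.List.pyGetD combo j 0)

-- itertools.combinations(xs, k): k-subsequences of xs in lexicographic (index) order
def pvCombos : List Int → Nat → List (List Int)
  | _, 0 => [[]]
  | [], _ + 1 => []
  | x :: rest, k + 1 => (pvCombos rest k).map (fun c => x :: c) ++ pvCombos rest (k + 1)

-- the 'for size in range(1, n+1)' loop with its break (best carried through)
def pvLoopA (d : PySem.Dict Int (List Int)) (verts : List Int) : List Int → Int → Int
  | [], best => best
  | size :: sizes, best =>
    if (pvCombos verts size.toNat).any (fun combo => pvAllPairs d combo) then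
      pvLoopA d verts sizes size
    else best

def brute_clique_number (adj : List (Int × List Int)) : Int :=
  let d := PySem.Dict.mk adj
  let verts := PySem.List.sorted d.keys (fun x => x) false
  let n := verts.length
  pvLoopA d verts (PySem.List.pyRange 1 ((n : Int) + 1) 1) 0

-- ===== PORT B =====
-- go(cands): include/exclude on the first candidate, candidates pruned to adj[v]
def pvGo (d : PySem.Dict Int (List Int)) (cands : List Int) : Nat :=
  match cands with
  | [] => 0
  | v :: rest =>
    let nv := (d.get? v).getD []
    max (1 + pvGo d (rest.filter fun w => nv.contains w)) (pvGo d rest)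
termination_by cands.length
decreasing_by
  · simpa using Nat.lt_succ_of_le (Nat.le_trans (List.length_filter_le _ _) (by simp))
  · exact Nat.lt_succ_self _

def brute_clique_number_alt (adj : List (Int × List Int)) : Int :=
  let d := PySem.Dict.mk adj
  ((pvGo d (PySem.List.sorted d.keys (fun x => x) false) : Nat) : Int)

-- ===== PRECONDITION & SPEC =====
def Spec_brute_clique_number (adj : List (Int × List Int)) (out : Int) : Prop := out = brute_clique_number_alt adj
instance (adj : List (Int × List Int)) (out : Int) : Decidable (Spec_brute_clique_number adj out) := by unfold Spec_brute_clique_number; infer_instance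

-- ===== CLAIM (what is proved, stated in full; the proofs are below) =====
def Claim_equal_brute_clique_number : Prop := ∀ (adj : List (Int × List Int)), Dom_brute_clique_number adj → Spec_brute_clique_number adj (brute_clique_number adj)

-- ===== LEMMAS AND PROOFS =====

-- a "clique" in A's (one-directional) sense: every later element is in adj[earlier]
def pvIsClique (d : PySem.Dict Int (List Int)) (t : List Int) : Prop :=
  t.Pairwise (fun a b => (((d.get? a).getD []).contains b) = true)

theorem mem_pvCombos (xs : List Int) : ∀ (k : Nat) (c : List Int),
    c ∈ pvCombos xs k ↔ c.Sublist xs ∧ c.length = k := by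
  induction xs with
  | nil =>
    intro k c
    cases k with
    | zero => simp [pvCombos, List.sublist_nil]
    | succ k => simp [pvCombos, List.sublist_nil]; rintro rfl; simp
  | cons x rest ih =>
    intro k c
    cases k with
    | zero =>
      simp [pvCombos]
      rintro rfl; simp
    | succ k =>
      simp only [pvCombos, List.mem_append, List.mem_map, ih]
      constructor
      · rintro (⟨c', ⟨hs, hl⟩, rfl⟩ | ⟨hs, hl⟩)
        · exact ⟨List.cons_sublist_cons.mpr hs, by simp [hl]⟩
        · exact ⟨hs.cons _, hl⟩
      · rintro ⟨hs, hl⟩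
        rcases List.sublist_cons_iff.mp hs with h | ⟨r, rfl, hr⟩
        · exact Or.inr ⟨h, hl⟩
        · exact Or.inl ⟨r, ⟨hr, by simpa using hl⟩, rfl⟩

theorem pvAllPairs_iff (d : PySem.Dict Int (List Int)) (c : List Int) :
    pvAllPairs d c = true ↔ pvIsClique d c := by
  rw [pvIsClique, List.pairwise_iff_getElem]
  simp only [pvAllPairs, List.all_eq_true, PySem.List.mem_pyRange_one]
  constructor
  · intro h i j hi hj hij
    have hh := h (i : Int) ⟨by omega, by exact_mod_cast hi⟩ (j : Int) ⟨by omega, by exact_mod_cast hj⟩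
    simpa [PySem.List.pyGetD_natCast, List.getD_eq_getElem, hi, hj] using hh
  · intro h i ⟨hi0, hi⟩ j ⟨hj1, hj⟩
    lift i to ℕ using hi0 with ni
    lift j to ℕ using (by omega : (0:Int) ≤ j) with nj
    have := h ni nj (by exact_mod_cast hi) (by exact_mod_cast hj) (by omega)
    simpa [PySem.List.pyGetD_natCast, List.getD_eq_getElem, (by exact_mod_cast hi : ni < c.length), (by exact_mod_cast hj : nj < c.length)] using this

theorem sublist_filter_of_forall {t l : List Int} (p : Int → Bool)
    (hs : t.Sublist l) (hp : ∀ x ∈ t, p x = true) : t.Sublist (l.filter p) := by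
  have : t.filter p = t := List.filter_eq_self.mpr hp
  simpa [this] using hs.filter p

theorem pvGo_ge (d : PySem.Dict Int (List Int)) (cands t : List Int)
    (hs : t.Sublist cands) (hc : pvIsClique d t) : t.length ≤ pvGo d cands := by
  fun_induction pvGo d cands generalizing t with
  | case1 => simpa using hs.length_le
  | case2 v rest nv ih1 ih2 =>
    simp only [List.unattach_filter, List.unattach_attach] at ih1 ⊢
    rcases List.sublist_cons_iff.mp hs with h | ⟨r, rfl, hr⟩
    · exact le_trans (ih2 t h hc) (le_max_right _ _)
    · have hpair := (List.pairwise_cons.mp hc)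
      have h1 : r.Sublist (rest.filter nv.contains) :=
        sublist_filter_of_forall _ hr (fun x hx => hpair.1 x hx)
      have hle := ih1 r h1 hpair.2
      have h2 : (v :: r).length ≤ 1 + pvGo d (rest.filter nv.contains) := by
        rw [List.length_cons]; omega
      exact le_trans h2 (le_max_left _ _)

theorem pvGo_wit (d : PySem.Dict Int (List Int)) (cands : List Int) :
    ∃ t, t.Sublist cands ∧ pvIsClique d t ∧ t.length = pvGo d cands := by
  fun_induction pvGo d cands with
  | case1 => exact ⟨[], by simp [pvIsClique]⟩
  | case2 v rest nv ih1 ih2 =>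
    simp only [List.unattach_filter, List.unattach_attach] at ih1 ⊢
    obtain ⟨t1, hs1, hc1, hl1⟩ := ih1
    obtain ⟨t2, hs2, hc2, hl2⟩ := ih2
    by_cases hcmp : pvGo d rest ≤ 1 + pvGo d (rest.filter nv.contains)
    · refine ⟨v :: t1, List.cons_sublist_cons.mpr (hs1.trans (List.filter_sublist)), ?_, ?_⟩
      · refine List.pairwise_cons.mpr ⟨fun w hw => ?_, hc1⟩
        exact (List.mem_filter.mp (hs1.mem hw)).2
      · have h2 : (v :: t1).length = 1 + pvGo d (rest.filter nv.contains) := by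
          rw [List.length_cons, hl1]; omega
        exact h2.trans (Nat.max_eq_left hcmp).symm
    · exact ⟨t2, hs2.trans (List.sublist_cons_self _ _), hc2,
        hl2.trans (Nat.max_eq_right (not_le.mp hcmp).le).symm⟩

theorem pvFound_iff (d : PySem.Dict Int (List Int)) (verts : List Int) (k : Nat) :
    ((pvCombos verts k).any (fun combo => pvAllPairs d combo) = true) ↔ k ≤ pvGo d verts := by
  rw [List.any_eq_true]
  constructor
  · rintro ⟨c, hm, hp⟩
    obtain ⟨hs, hl⟩ := (mem_pvCombos verts k c).mp hm
    exact hl ▸ pvGo_ge d verts c hs ((pvAllPairs_iff d c).mp hp)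
  · intro hk
    obtain ⟨t, hs, hc, hl⟩ := pvGo_wit d verts
    refine ⟨t.take k, (mem_pvCombos verts k _).mpr ⟨(t.take_sublist k).trans hs, by
      rw [List.length_take]; omega⟩, (pvAllPairs_iff d _).mpr (hc.sublist (t.take_sublist k))⟩

theorem pvGo_le_len (d : PySem.Dict Int (List Int)) (verts : List Int) :
    pvGo d verts ≤ verts.length := by
  obtain ⟨t, hs, _, hl⟩ := pvGo_wit d verts
  exact hl ▸ hs.length_le

theorem pvLoopA_eq (d : PySem.Dict Int (List Int)) (verts : List Int) (fuel : Nat) (a : Int)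
    (hf : (((verts.length : Int) + 1) - a).toNat = fuel)
    (h1 : 1 ≤ a) (h2 : a ≤ (verts.length : Int) + 1) (h3 : a - 1 ≤ (pvGo d verts : Int)) :
    pvLoopA d verts (PySem.List.pyRange a ((verts.length : Int) + 1) 1) (a - 1)
      = min (pvGo d verts : Int) (verts.length : Int) := by
  have hM := pvGo_le_len d verts
  induction fuel generalizing a with
  | zero =>
    have ha : a = (verts.length : Int) + 1 := by omega
    rw [PySem.List.pyRange_one_eq_nil (by omega)]
    simp only [pvLoopA]
    omega
  | succ fuel ih =>
    have ha : a < (verts.length : Int) + 1 := by omega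
    rw [PySem.List.pyRange_one_cons ha]
    simp only [pvLoopA]
    by_cases hb : ((pvCombos verts a.toNat).any fun combo => pvAllPairs d combo) = true
    · rw [if_pos hb]
      have hle := (pvFound_iff d verts a.toNat).mp hb
      have h := ih (a + 1) (by omega) (by omega) (by omega) (by omega)
      simpa using h
    · rw [if_neg hb]
      have hgt : ¬ a.toNat ≤ pvGo d verts := fun hc => hb ((pvFound_iff d verts a.toNat).mpr hc)
      omega

-- ===== VERDICT (by name: the statement is the Claim_ definition above) =====
theorem brute_clique_number_spec : Claim_equal_brute_clique_number := by
  intro adj _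
  unfold Spec_brute_clique_number brute_clique_number brute_clique_number_alt
  show pvLoopA (PySem.Dict.mk adj)
      (PySem.List.sorted (PySem.Dict.mk adj).keys (fun x => x) false)
      (PySem.List.pyRange 1
        (((PySem.List.sorted (PySem.Dict.mk adj).keys (fun x => x) false).length : Int) + 1) 1) 0
    = ((pvGo (PySem.Dict.mk adj)
        (PySem.List.sorted (PySem.Dict.mk adj).keys (fun x => x) false) : Nat) : Int)
  have hM := pvGo_le_len (PySem.Dict.mk adj)
      (PySem.List.sorted (PySem.Dict.mk adj).keys (fun x => x) false)
  have h := pvLoopA_eq (PySem.Dict.mk adj)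
      (PySem.List.sorted (PySem.Dict.mk adj).keys (fun x => x) false)
      (PySem.List.sorted (PySem.Dict.mk adj).keys (fun x => x) false).length
      1 (by omega) (by omega) (by omega) (by positivity)
  have h0 : (1 : Int) - 1 = 0 := by norm_num
  rw [h0] at h
  rw [h]
  omega
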